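-- pv_equiv track=rewrite | github.com/InternScience/CrystalX | training_code/crystalx_train/common/utils.py | one_atom_purturb
-- ===== SOURCE A (Python) =====
-- def one_atom_purturb(y):
--     real_num = len(y)
--     refine_z = [y]
--     for i in range(real_num):
--         if y[i] in [7,16]:
--             new_z = [item for item in y]
--             new_z[i] += 1
--             refine_z.append(new_z)
--             new_z = [item for item in y]
--             new_z[i] -= 1
--             refine_z.append(new_z)
--         if y[i] in [8,17]:
--             new_z = [item for item in y]
--             new_z[i] -= 1
--             refine_z.append(new_z)
--             if y[i] in [8]:
--                 new_z = [item for item in y]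
--                 new_z[i] -= 2
--                 refine_z.append(new_z)
--         if y[i] in [6,15]:
--             new_z = [item for item in y]
--             new_z[i] += 1
--             refine_z.append(new_z)
--             if y[i] in [6]:
--                 new_z = [item for item in y]
--                 new_z[i] += 2
--                 refine_z.append(new_z)
--     return refine_z
-- ===== SOURCE B (Python) =====
-- def _deltas(z):
--     if z in (7, 16): return (1, -1)
--     if z == 8: return (-1, -2)
--     if z == 17: return (-1,)
--     if z == 6: return (1, 2)
--     if z == 15: return (1,)
--     return ()
--
--
-- def one_atom_purturb(y):
--     # Reverse sweep: maintain the processed suffix (reversed) and all perturbed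
--     # variants of that suffix, each also stored reversed so extending every
--     # pending variant by the new head is an O(1) in-place append instead of a
--     # full-list copy per step. Reverse everything once at the end.
--     racc = []  # perturbed variants of the processed suffix, stored reversed
--     rsuf = []  # the processed suffix itself, reversed
--     for h in reversed(y):
--         new = [rsuf + [h + d] for d in _deltas(h)]
--         for p in racc:
--             p.append(h)
--         racc = new + racc
--         rsuf.append(h)
--     return [y] + [p[::-1] for p in racc]
-- ===== Notes on version B (the rewrite author's own statement) =====
-- stated objective: alternative
-- what changed: Replaces A's forward index loop that copies the whole list for every branch with a reverse sweep that keeps the processed suffix and its perturbed variants stored back-to-front, extends all pending variants by in-place appends, and reverses everything once at the end.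
import Mathlib
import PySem

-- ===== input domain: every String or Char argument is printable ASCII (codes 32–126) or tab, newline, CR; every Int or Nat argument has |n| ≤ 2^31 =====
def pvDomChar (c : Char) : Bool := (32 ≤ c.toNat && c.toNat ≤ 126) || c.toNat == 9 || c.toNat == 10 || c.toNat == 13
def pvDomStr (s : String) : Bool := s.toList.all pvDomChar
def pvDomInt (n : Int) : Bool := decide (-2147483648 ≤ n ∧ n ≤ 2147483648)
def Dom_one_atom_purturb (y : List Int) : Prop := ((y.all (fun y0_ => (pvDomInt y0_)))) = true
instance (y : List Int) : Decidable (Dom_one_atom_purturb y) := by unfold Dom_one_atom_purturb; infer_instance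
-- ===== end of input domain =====

-- B replaces A's forward index loop (full-list copy per branch) by a reverse sweep that
-- keeps reversed suffix/variants and extends pending variants by appends, reversing once
-- at the end; objective: alternative (same cost, different traversal). A is total.


-- ===== PORT A =====
def one_atom_purturb (y : List Int) : List (List Int) :=
  (List.range y.length).foldl (fun refine_z i =>
    let refine_z :=
      if y.getD i 0 = 7 ∨ y.getD i 0 = 16 then
        let new_z := (y.map (fun item => item)).set i (y.getD i 0 + 1)
        let refine_z := refine_z ++ [new_z]
        let new_z := (y.map (fun item => item)).set i (y.getD i 0 - 1)
        refine_z ++ [new_z]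
      else refine_z
    let refine_z :=
      if y.getD i 0 = 8 ∨ y.getD i 0 = 17 then
        let new_z := (y.map (fun item => item)).set i (y.getD i 0 - 1)
        let refine_z := refine_z ++ [new_z]
        if y.getD i 0 = 8 then
          let new_z := (y.map (fun item => item)).set i (y.getD i 0 - 2)
          refine_z ++ [new_z]
        else refine_z
      else refine_z
    let refine_z :=
      if y.getD i 0 = 6 ∨ y.getD i 0 = 15 then
        let new_z := (y.map (fun item => item)).set i (y.getD i 0 + 1)
        let refine_z := refine_z ++ [new_z]
        if y.getD i 0 = 6 then
          let new_z := (y.map (fun item => item)).set i (y.getD i 0 + 2)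
          refine_z ++ [new_z]
        else refine_z
      else refine_z
    refine_z) [y]

-- ===== PORT B =====
def pvDeltas (z : Int) : List Int :=
  if z = 7 ∨ z = 16 then [1, -1]
  else if z = 8 then [-1, -2]
  else if z = 17 then [-1]
  else if z = 6 then [1, 2]
  else if z = 15 then [1]
  else []

def one_atom_purturb_alt (y : List Int) : List (List Int) :=
  let st := y.reverse.foldl
    (fun (st : List (List Int) × List Int) h =>
      ((pvDeltas h).map (fun d => st.2 ++ [h + d]) ++ st.1.map (fun p => p ++ [h]),
       st.2 ++ [h]))
    ([], [])
  y :: st.1.map (fun p => p.reverse)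

-- ===== PRECONDITION & SPEC =====
def Spec_one_atom_purturb (y : List Int) (out : List (List Int)) : Prop := out = one_atom_purturb_alt y
instance (y : List Int) (out : List (List Int)) : Decidable (Spec_one_atom_purturb y out) := by unfold Spec_one_atom_purturb; infer_instance

-- ===== CLAIM (what is proved, stated in full; the proofs are below) =====
def Claim_equal_one_atom_purturb : Prop := ∀ (y : List Int), Dom_one_atom_purturb y → Spec_one_atom_purturb y (one_atom_purturb y)

-- ===== LEMMAS AND PROOFS =====

-- mathematical spec of the perturbation list (no [y] sentinel): structural recursion
def pvPerturbs : List Int → List (List Int)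
  | [] => []
  | h :: t => (pvDeltas h).map (fun d => (h + d) :: t) ++ (pvPerturbs t).map (fun p => h :: p)

-- A's per-index block of perturbed lists
def pvBlock (y : List Int) (i : Nat) : List (List Int) :=
  (pvDeltas (y.getD i 0)).map (fun d => y.take i ++ [y.getD i 0 + d] ++ y.drop (i + 1))

-- A's loop body appends exactly pvBlock
theorem pv_step_eq (y : List Int) (i : Nat) (hi : i ∈ List.range y.length) :
    ∀ acc : List (List Int),
      (fun refine_z i =>
        let refine_z :=
          if y.getD i 0 = 7 ∨ y.getD i 0 = 16 then
            let new_z := (y.map (fun item => item)).set i (y.getD i 0 + 1)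
            let refine_z := refine_z ++ [new_z]
            let new_z := (y.map (fun item => item)).set i (y.getD i 0 - 1)
            refine_z ++ [new_z]
          else refine_z
        let refine_z :=
          if y.getD i 0 = 8 ∨ y.getD i 0 = 17 then
            let new_z := (y.map (fun item => item)).set i (y.getD i 0 - 1)
            let refine_z := refine_z ++ [new_z]
            if y.getD i 0 = 8 then
              let new_z := (y.map (fun item => item)).set i (y.getD i 0 - 2)
              refine_z ++ [new_z]
            else refine_z
          else refine_z
        let refine_z :=
          if y.getD i 0 = 6 ∨ y.getD i 0 = 15 then
            let new_z := (y.map (fun item => item)).set i (y.getD i 0 + 1)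
            let refine_z := refine_z ++ [new_z]
            if y.getD i 0 = 6 then
              let new_z := (y.map (fun item => item)).set i (y.getD i 0 + 2)
              refine_z ++ [new_z]
            else refine_z
          else refine_z
        refine_z) acc i = acc ++ pvBlock y i := by
  intro acc
  rw [List.mem_range] at hi
  have hs : ∀ v : Int, y.set i v = y.take i ++ v :: y.drop (i + 1) :=
    fun v => List.set_eq_take_cons_drop v hi
  by_cases h7 : y.getD i 0 = 7 <;> by_cases h16 : y.getD i 0 = 16 <;>
    by_cases h8 : y.getD i 0 = 8 <;> by_cases h17 : y.getD i 0 = 17 <;>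
    by_cases h6 : y.getD i 0 = 6 <;> by_cases h15 : y.getD i 0 = 15 <;>
    simp_all [pvBlock, pvDeltas, List.map_id']

-- the flatMap of blocks is the structural-recursion spec
theorem pv_flatMap_blocks (y : List Int) :
    (List.range y.length).flatMap (pvBlock y) = pvPerturbs y := by
  induction y with
  | nil => simp [pvPerturbs]
  | cons h t ih =>
    have hshift : ∀ i : Nat, pvBlock (h :: t) (i + 1) = (pvBlock t i).map (fun p => h :: p) := by
      intro i
      simp [pvBlock, List.map_map, Function.comp]
    rw [List.length_cons, List.range_succ_eq_map, List.flatMap_cons, List.flatMap_map]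
    simp only [hshift]
    rw [← List.map_flatMap, ih]
    simp [pvBlock, pvPerturbs]

-- B's fold maintains (reversed variants of the processed suffix, reversed suffix)
theorem pv_fold_inv (y : List Int) :
    y.reverse.foldl
      (fun (st : List (List Int) × List Int) h =>
        ((pvDeltas h).map (fun d => st.2 ++ [h + d]) ++ st.1.map (fun p => p ++ [h]),
         st.2 ++ [h]))
      ([], [])
    = ((pvPerturbs y).map (fun p => p.reverse), y.reverse) := by
  rw [List.foldl_reverse]
  induction y with
  | nil => simp [pvPerturbs]
  | cons h t ih =>
    rw [List.foldr_cons, ih]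
    simp [pvPerturbs, List.map_map, Function.comp_def]

-- ===== VERDICT (by name: the statement is the Claim_ definition above) =====
theorem one_atom_purturb_spec : Claim_equal_one_atom_purturb := by
  intro y _
  unfold Spec_one_atom_purturb
  have h1 : one_atom_purturb y
      = (List.range y.length).foldl (fun acc i => acc ++ pvBlock y i) [y] := by
    unfold one_atom_purturb
    exact PySem.List.foldl_congr_mem' _ _ _ _ (fun i hi acc => pv_step_eq y i hi acc)
  rw [h1, PySem.List.foldl_append_eq_flatMap, pv_flatMap_blocks]
  unfold one_atom_purturb_alt
  rw [pv_fold_inv]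
  simp [List.map_map]
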